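/- GENERATED by tools/from_farm_form.py from prooffarm-gif/accepted/DGifSlurp.P/Proof.lean (a worked proof of the farm's unit `DGifSlurp.P`,
   accepted by the verdict) — do not edit. -/
import Gif.Spec.Units.DGifSlurp_P
import Gif.Spec.AllSegs

open X86 X86.User Asan ProgX.Base ProgX.Base.Spec Gif.Spec

set_option maxRecDepth 4000
set_option maxHeartbeats 4000000

/-!
  `DGifSlurp.P` (0x10a680 … 0x10a6d3, 16 instructions; dgif_lib.c:1186): THE PROLOGUE OF THE PROTECTED FUNCTION `DGifSlurp`,
  after the recipe of Gif/Spec/FrameCarry.lean and farm.gif/worked/DGifGetWord.P. The blocks below: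
    1. the prelude and the walk to the cut behind the last inline shadow store (0x10a6d3);
    2. `name_stores3`: the memory before the three shadow stores gets the name `M0`,
       `hmem : s.mem = storesMem M0 ((RA − 152) / 8) Gif.Frames.DGifSlurp.prologue`;
    3. about `M0` (a nest of STACK stores over `e.mem`): the footprint `hsame0`, the six saved registers' slots;
    4. `after_prologue` (`HeapInv` with the own frame pushed, `GifOK`, `rem`), `prologue_same` (the footprint);
    5. the exit assertion `Start` = `At` (= `Core` + the environment) + `rdi`, field by field.
-/

/-- The prologue of `DGifSlurp` establishes `Start` at 0x10a6d3 (`lea rdi, [rdi + 58H]`, dgif_lib.c:1193). -/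
theorem Gif.Spec.Proved.DGifSlurp_P_ok : Gif.Spec.DGifSlurp_P.Statement := by
  intro Lay hLay μ hμ u₀ hcode H rest frames F R e ret he hpre
  -- 1. THE PRELUDE: the entry's facts (`he_align`, `he_room`, `he_top`, `he_retAddr`, `he_df`, `he_mx` …), the precondition
  have he0 := he
  v_entry he
  obtain ⟨henv, hrdi, hcomplete⟩ := hpre
  -- THE WALK (0x10a680 … 0x10a6d3): six pushes, `sub rsp, 104`, `mov rbp, rdi`, the frame's three header words, three poison stores
  u_walk hcode [hμ.vendor] until [Gif.L.DGifSlurp.at_10a6d3] span [ProgX.Base.L.textLo, ProgX.Base.L.textHi] side (v_side)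
  -- 2. NAMING THE MEMORY before the three shadow stores (0x10a6b2, 0x10a6bd, 0x10a6c8): the index register's source (`rsp` at
  -- the `mov r14, rsp`), then per store the displacement (decimal), its granule offset, its width, its value (decimal)
  have e152 : (e.reg .rsp - 152).toNat = (e.reg .rsp).toNat - 152 := by u_omega
  obtain ⟨M0, hM0, hmem⟩ := name_stores3 (e.reg .rsp - 152) 12582912 12582916 12582920
    0 4 4059165169 4 4 4060410372 8 4 4092850944
    w_mem (by omega) (by decide) (by decide) (by decide) (by decide) (by decide) (by decide)
  have hpro : Gif.Frames.DGifSlurp.prologue = [⟨0, 4, 4059165169⟩, ⟨4, 4, 4060410372⟩, ⟨8, 4, 4092850944⟩] := rfl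
  rw [← hpro, e152] at hmem
  -- 3. ABOUT `M0`: only stack stores over `e.mem` (six pushes, the frame's three header words)
  have hsame0 : Mem.SameExcept [⟨(e.reg .rsp).toNat - 848, (e.reg .rsp).toNat⟩] e.mem M0 := by
    rw [hM0]
    u_same
  have k_r15 : M0.readLE (e.reg .rsp - 8) 8 = (e.reg .r15).toNat := by
    rw [hM0]
    u_read
  have k_r14 : M0.readLE (e.reg .rsp - 16) 8 = (e.reg .r14).toNat := by
    rw [hM0]
    u_read
  have k_r13 : M0.readLE (e.reg .rsp - 24) 8 = (e.reg .r13).toNat := by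
    rw [hM0]
    u_read
  have k_r12 : M0.readLE (e.reg .rsp - 32) 8 = (e.reg .r12).toNat := by
    rw [hM0]
    u_read
  have k_rbp : M0.readLE (e.reg .rsp - 40) 8 = (e.reg .rbp).toNat := by
    rw [hM0]
    u_read
  have k_rbx : M0.readLE (e.reg .rsp - 48) 8 = (e.reg .rbx).toNat := by
    rw [hM0]
    u_read
  clear hM0 w_mem
  -- 4. THE ENVIRONMENT behind the prologue: the heap's invariant with the own frame pushed, the state invariant, the reader
  obtain ⟨hinv1, hok1, hrem1⟩ := after_prologue (top := (e.reg .rsp).toNat) (top' := (e.reg .rsp).toNat - 152) (ro := 152)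
    (Fl := Gif.Frames.DGifSlurp) henv.heap.inv henv.ctx henv.ok Gif.Frames.DGifSlurp_ok rfl he_align hsame0
    (by omega) (Nat.le_refl _) (by omega) (by omega)
  -- the footprint in front of the contract's windows (`Core.same`), and the prologue's own (for the return address)
  have hsame1 := prologue_same (top := (e.reg .rsp).toNat) (Fl := Gif.Frames.DGifSlurp) Gif.Frames.DGifSlurp_ok
    (ro := 152) (ro' := 56) rfl rfl he_align (by omega) (by omega) hsame0 []
  have hsame2 := prologue_same (top := (e.reg .rsp).toNat) (Fl := Gif.Frames.DGifSlurp) Gif.Frames.DGifSlurp_ok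
    (ro := 152) (ro' := 56) rfl rfl he_align (by omega) (by omega) hsame0
    [⟨0x800000, 0x1000020⟩, ⟨R.cur, R.cur + 8⟩]
  have hin : ∀ s, s ∈ Gif.Frames.DGifSlurp.prologue → s.idx + s.width ≤ 12 := by decide
  rw [← hmem] at hinv1 hok1 hrem1 hsame1 hsame2
  -- 5. THE EXIT ASSERTION: `Core` at 0x10a6d3 …
  have hcore : DGifSlurp.Core Gif.L.DGifSlurp.at_10a6d3 H rest frames F R u₀ e ret s_10a6c8 := {
    entry := he0
    pre := ⟨henv, hrdi, hcomplete⟩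
    rip := w_rip
    rsp := w_rsp
    rbp := w_rbp
    r14 := w_r14
    -- a slot is read THROUGH the shadow stores (`readLE_storesMem`), then in `M0`
    slot_r15 := by
      rw [hmem, readLE_storesMem M0 _ 12 _ hin (by omega) _ _ (by u_omega)]
      exact k_r15
    slot_r14 := by
      rw [hmem, readLE_storesMem M0 _ 12 _ hin (by omega) _ _ (by u_omega)]
      exact k_r14
    slot_r13 := by
      rw [hmem, readLE_storesMem M0 _ 12 _ hin (by omega) _ _ (by u_omega)]
      exact k_r13
    slot_r12 := by
      rw [hmem, readLE_storesMem M0 _ 12 _ hin (by omega) _ _ (by u_omega)]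
      exact k_r12
    slot_rbp := by
      rw [hmem, readLE_storesMem M0 _ 12 _ hin (by omega) _ _ (by u_omega)]
      exact k_rbp
    slot_rbx := by
      rw [hmem, readLE_storesMem M0 _ 12 _ hin (by omega) _ _ (by u_omega)]
      exact k_rbx
    -- the return address: the prologue's footprint ends below its slot
    slot_ra := by
      rw [prologue_same_readLE hsame1 (e.reg .rsp) 8 (Nat.le_refl _) (by omega)]
      exact he_retAddr
    rem := Nat.le_of_eq hrem1
    same := hsame2
    code := ProgX.Base.conv_code_in w_eq
    -- DF and MXCSR by hand (`v_inv` is slow behind a walk with shadow stores)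
    abi := by
      refine ProgX.Base.abiInv_of ?_ ?_
      · rw [w_flags]
        simp only [X86.User.df_setStatus]
        exact he_df
      · rw [w_mxcsr]
        exact he_mx
  }
  -- … `At` for the entry's heap and forest, and `rdi` still holds gif
  refine ReachVia.done ?_
  exact {
    at_ := {
      core := hcore
      region := ⟨rfl, rfl⟩
      gif := rfl
      pv := rfl
      inv := hinv1
      ok := hok1
    }
    rdi := w_kept.get .rdi rfl
  }
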